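-- pv_equiv track=rewrite | github.com/dmtran20/CS115 | hw4.py | pascalrow_inside
-- ===== SOURCE A (Python) =====
-- def pascalrow_inside(x):
--     '''x=each row. base case if row is empty'''
--     if x==[]:
--         return []
--     '''base case the len is 1 is a base case'''
--     if len(x)==1:
--         return []
--     else:
--         '''[return the first value plus the next value]+[next value plus the third value] until it hits length of 1 for the row to stop'''
--         return [x[0]+x[1]]+pascalrow_inside(x[1:])
-- ===== SOURCE B (Python) =====
-- def pascalrow_inside(x):
--     return [a + b for a, b in zip(x, x[1:])]
-- ===== Notes on version B (the rewrite author's own statement) =====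
-- stated objective: idiomatic
-- what changed: Replaced the recursive slice-and-concatenate definition by a single zip of the list with its tail, summing each adjacent pair in one comprehension.
import Mathlib
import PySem

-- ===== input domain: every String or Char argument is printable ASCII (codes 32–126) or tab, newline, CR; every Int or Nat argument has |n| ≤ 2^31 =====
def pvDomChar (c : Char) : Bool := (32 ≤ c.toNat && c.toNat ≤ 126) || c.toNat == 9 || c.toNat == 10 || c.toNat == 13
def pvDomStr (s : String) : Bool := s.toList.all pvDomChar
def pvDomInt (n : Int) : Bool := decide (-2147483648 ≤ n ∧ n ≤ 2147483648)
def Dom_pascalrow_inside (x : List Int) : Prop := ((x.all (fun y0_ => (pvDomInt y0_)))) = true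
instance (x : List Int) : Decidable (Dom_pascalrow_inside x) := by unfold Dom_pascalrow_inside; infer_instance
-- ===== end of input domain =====

-- B replaces A's recursive slice-and-concatenate with a zip of the list against its tail (idiomatic, linear).

-- ===== PORT A =====
-- literal transliteration: empty and length-1 base cases, else [x[0]+x[1]] ++ recurse on x[1:]
def pascalrow_inside (x : List Int) : List Int :=
  match x with
  | [] => []
  | [_] => []
  | a :: b :: t => ([a + b]) ++ pascalrow_inside (b :: t)

-- ===== PORT B =====
-- transliteration of Source B: comprehension over zip(x, x[1:])
def pascalrow_inside_alt (x : List Int) : List Int :=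
  (x.zip x.tail).map (fun p => p.1 + p.2)

-- ===== PRECONDITION & SPEC =====
def Spec_pascalrow_inside (x : List Int) (out : List Int) : Prop := out = pascalrow_inside_alt x
instance (x : List Int) (out : List Int) : Decidable (Spec_pascalrow_inside x out) := by unfold Spec_pascalrow_inside; infer_instance

-- ===== CLAIM (what is proved, stated in full; the proofs are below) =====
def Claim_equal_pascalrow_inside : Prop := ∀ (x : List Int), Dom_pascalrow_inside x → Spec_pascalrow_inside x (pascalrow_inside x)

-- ===== LEMMAS AND PROOFS =====
theorem pascalrow_inside_eq (x : List Int) : pascalrow_inside x = pascalrow_inside_alt x := by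
  match x with
  | [] => rfl
  | [_] => rfl
  | a :: b :: t =>
    simp [pascalrow_inside, pascalrow_inside_alt, pascalrow_inside_eq (b :: t)]

-- ===== VERDICT (by name: the statement is the Claim_ definition above) =====
theorem pascalrow_inside_spec : Claim_equal_pascalrow_inside := by
  intro x _
  exact pascalrow_inside_eq x
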